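-- pv_equiv track=rewrite | github.com/joel-tuberosa/ELIE | mfnb/utils.py | mask_special_char
-- ===== SOURCE A (Python) =====
-- def mask_special_char(text, charset, mask="~"):
--     '''
--     Masks and indexes the special character found in the input text.
--     Returns a the masked text along with a list of the substituted
--     characters, in the order they were found.
--     '''
--
--     charset = list(charset) + [mask]
--     masked_chars = []
--     masked_text = ""
--     for i in range(len(text)):
--         c = text[i]
--         if c in charset:
--             masked_text += mask
--             masked_chars.append(c)
--         else:
--             masked_text += c
--     return (masked_text, masked_chars)
-- ===== SOURCE B (Python) =====
-- def mask_special_char(text, charset, mask="~"):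
--     special = set(charset)
--     if len(mask) == 1:
--         special.add(mask)
--     masked_chars = [c for c in text if c in special]
--     masked_text = "".join(mask if c in special else c for c in text)
--     return (masked_text, masked_chars)
-- ===== Notes on version B (the rewrite author's own statement) =====
-- stated objective: idiomatic
-- what changed: Replaces A's index loop with string accumulators and a per-character scan of list(charset)+[mask] by a precomputed set of special characters (charset plus mask when it is a single character) and two comprehensions: a filter collecting the masked characters and a map+join building the masked text; set lookup and join replace the linear 'in' scan and repeated string concatenation.
import Mathlib
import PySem

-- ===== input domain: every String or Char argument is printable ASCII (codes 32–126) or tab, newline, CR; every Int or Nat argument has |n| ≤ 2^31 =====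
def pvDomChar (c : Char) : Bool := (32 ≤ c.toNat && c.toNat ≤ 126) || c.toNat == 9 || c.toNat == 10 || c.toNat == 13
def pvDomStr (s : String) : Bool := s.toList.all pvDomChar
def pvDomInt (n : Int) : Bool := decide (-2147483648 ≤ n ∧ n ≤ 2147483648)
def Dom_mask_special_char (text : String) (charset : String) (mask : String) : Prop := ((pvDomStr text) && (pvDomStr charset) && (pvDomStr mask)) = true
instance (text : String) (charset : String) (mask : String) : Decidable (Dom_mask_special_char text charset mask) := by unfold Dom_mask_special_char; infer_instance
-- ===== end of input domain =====

-- B replaces A's index loop with a set of the special characters and two comprehensions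
-- (filter for the masked characters, map+join for the masked text); idiomatic, same cost.

-- ===== PORT A =====
-- A: charset := list(charset) + [mask]; one loop over the text indices accumulating
-- (masked_text, masked_chars).  Text accumulated as List Char, packed with String.ofList at the end.
def mask_special_char (text : String) (charset : String) (mask : String) : String × List String :=
  let cs : List String := charset.toList.map (fun d => String.ofList [d]) ++ [mask]
  let r := text.toList.foldl
    (fun (st : List Char × List String) c =>
      if String.ofList [c] ∈ cs then (st.1 ++ mask.toList, st.2 ++ [String.ofList [c]])
      else (st.1 ++ [c], st.2)) ([], [])
  (String.ofList r.1, r.2)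

-- ===== PORT B =====
-- B-side helper: special = set(charset); if len(mask) == 1: special.add(mask)
def pvSpecial (charset : String) (mask : String) : PySem.Set Char :=
  match mask.toList with
  | [m] => PySem.Set.add (PySem.Set.ofList charset.toList) m
  | _ => PySem.Set.ofList charset.toList

def mask_special_char_alt (text : String) (charset : String) (mask : String) : String × List String :=
  let special := pvSpecial charset mask
  let masked_chars := (text.toList.filter (fun c => PySem.Set.contains special c)).map
    (fun c => String.ofList [c])
  let masked_text := String.ofList
    ((text.toList.map (fun c =>
      if PySem.Set.contains special c then mask.toList else [c])).flatten)
  (masked_text, masked_chars)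

-- ===== PRECONDITION & SPEC =====
def Spec_mask_special_char (text : String) (charset : String) (mask : String) (out : String × List String) : Prop := out = mask_special_char_alt text charset mask
instance (text : String) (charset : String) (mask : String) (out : String × List String) : Decidable (Spec_mask_special_char text charset mask out) := by unfold Spec_mask_special_char; infer_instance

-- ===== CLAIM (what is proved, stated in full; the proofs are below) =====
def Claim_equal_mask_special_char : Prop := ∀ (text : String) (charset : String) (mask : String), Dom_mask_special_char text charset mask → Spec_mask_special_char text charset mask (mask_special_char text charset mask)

-- ===== LEMMAS AND PROOFS =====

-- A's membership test 'c in list(charset) + [mask]' agrees with B's set membership.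
lemma mem_cs_iff (charset mask : String) (c : Char) :
    (String.ofList [c] ∈ charset.toList.map (fun d => String.ofList [d]) ++ [mask]) ↔
    PySem.Set.contains (pvSpecial charset mask) c = true := by
  have hmask : mask = String.ofList mask.toList := String.ofList_toList.symm
  unfold pvSpecial
  match hm : mask.toList with
  | [m] =>
    rw [hmask, hm]
    simp [PySem.Set.mem_add, PySem.Set.mem_ofList, List.mem_map, String.ofList_inj]
  | [] =>
    rw [hmask, hm]
    simp [PySem.Set.mem_ofList, List.mem_map, String.ofList_inj]
  | a :: b :: rest =>
    rw [hmask, hm]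
    simp [PySem.Set.mem_ofList, List.mem_map, String.ofList_inj]

-- A's loop, with a Boolean test p and both accumulators generalized, in closed form.
lemma loop_closed (p : Char → Bool) (msk : List Char) (l : List Char)
    (a1 : List Char) (a2 : List String) :
    l.foldl
      (fun (st : List Char × List String) c =>
        if p c then (st.1 ++ msk, st.2 ++ [String.ofList [c]])
        else (st.1 ++ [c], st.2)) (a1, a2)
    = (a1 ++ (l.map (fun c => if p c then msk else [c])).flatten,
       a2 ++ (l.filter p).map (fun c => String.ofList [c])) := by
  induction l generalizing a1 a2 with
  | nil => simp
  | cons c l ih =>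
    by_cases h : p c <;> simp [h, ih, List.append_assoc]

-- ===== VERDICT (by name: the statement is the Claim_ definition above) =====
theorem mask_special_char_spec : Claim_equal_mask_special_char := by
  intro text charset mask _
  unfold Spec_mask_special_char mask_special_char mask_special_char_alt
  have hfun :
      (fun (st : List Char × List String) c =>
        if String.ofList [c] ∈ charset.toList.map (fun d => String.ofList [d]) ++ [mask] then
          (st.1 ++ mask.toList, st.2 ++ [String.ofList [c]])
        else (st.1 ++ [c], st.2))
      = (fun (st : List Char × List String) c =>
        if PySem.Set.contains (pvSpecial charset mask) c then
          (st.1 ++ mask.toList, st.2 ++ [String.ofList [c]])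
        else (st.1 ++ [c], st.2)) := by
    funext st c
    rw [if_congr (mem_cs_iff charset mask c) rfl rfl]
  simp only [hfun]
  rw [loop_closed (fun c => PySem.Set.contains (pvSpecial charset mask) c)]
  simp
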